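-- pv_equiv track=rewrite | github.com/SandyHoffmann/ListasPythonAlgoritmo | Lista 6/SH-PCRG-AER-Alg-06-Ex-10.py | formataStr
-- ===== SOURCE A (Python) =====
-- def formataStr(lista):
--     novastr = ""
--     for x in range(len(lista)):
--         if x==(len(lista)-1):
--             novastr +=lista[x]
--         elif x == (len(lista)-2):
--             novastr += f'{lista[x]} e '
--         else:
--             novastr += f'{lista[x]}, '
--     return novastr
-- ===== SOURCE B (Python) =====
-- def formataStr(lista):
--     if not lista:
--         return ""
--     if len(lista) == 1:
--         return lista[0]
--     return ", ".join(lista[:-1]) + " e " + lista[-1]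
-- ===== Notes on version B (the rewrite author's own statement) =====
-- stated objective: idiomatic
-- what changed: Replaces the index loop with per-element three-way branching by early returns for the degenerate sizes plus a slice-then-join decomposition: ', '.join of all but the last element followed by ' e ' and the last element.
import Mathlib
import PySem

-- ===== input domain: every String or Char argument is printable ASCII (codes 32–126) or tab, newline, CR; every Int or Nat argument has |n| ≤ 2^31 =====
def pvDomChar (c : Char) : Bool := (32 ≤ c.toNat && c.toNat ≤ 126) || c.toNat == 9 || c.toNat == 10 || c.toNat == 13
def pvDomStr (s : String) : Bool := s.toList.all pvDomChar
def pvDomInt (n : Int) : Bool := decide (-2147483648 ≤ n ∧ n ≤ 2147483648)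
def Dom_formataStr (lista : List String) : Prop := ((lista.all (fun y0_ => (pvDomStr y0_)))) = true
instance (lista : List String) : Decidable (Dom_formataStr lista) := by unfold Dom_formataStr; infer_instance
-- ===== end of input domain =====

-- B replaces A's index loop with three-way branching by early returns for sizes 0/1
-- plus a join of all-but-the-last element followed by " e " and the last element.

-- ===== PORT A =====
-- 'novastr += …' loop over range(len(lista)); lista[x] is in range on every iteration,
-- so pyGetD with default "" is exact; f'{s}…' on a str s is s ++ the literal.
def formataStr (lista : List String) : String :=
  (PySem.List.pyRange 0 (lista.length : Int) 1).foldl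
    (fun novastr x =>
      if x == (lista.length : Int) - 1 then
        novastr ++ PySem.List.pyGetD lista x ""
      else if x == (lista.length : Int) - 2 then
        novastr ++ PySem.List.pyGetD lista x "" ++ " e "
      else
        novastr ++ PySem.List.pyGetD lista x "" ++ ", ") ""

-- ===== PORT B =====
-- early returns for len 0 and len 1; otherwise ", ".join(lista[:-1]) + " e " + lista[-1]
def formataStr_alt (lista : List String) : String :=
  match lista with
  | [] => ""
  | [a] => a
  | _ =>
    PySem.Str.join ", " (PySem.List.slice lista none (some (-1))) ++ " e "
      ++ PySem.List.pyGetD lista (-1) ""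

-- ===== PRECONDITION & SPEC =====
def Spec_formataStr (lista : List String) (out : String) : Prop := out = formataStr_alt lista
instance (lista : List String) (out : String) : Decidable (Spec_formataStr lista out) := by unfold Spec_formataStr; infer_instance

-- ===== CLAIM (what is proved, stated in full; the proofs are below) =====
def Claim_equal_formataStr : Prop := ∀ (lista : List String), Dom_formataStr lista → Spec_formataStr lista (formataStr lista)

-- ===== LEMMAS AND PROOFS =====

-- common recursive description of the output, proof helper only
def fmtSpec : List String → String
  | [] => ""
  | [a] => a
  | [a, b] => a ++ " e " ++ b
  | a :: b :: c :: t => a ++ ", " ++ fmtSpec (b :: c :: t)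

theorem string_toList_eq {s t : String} (h : s.toList = t.toList) : s = t :=
  String.toList_injective h

theorem join_cons_cons (a b : String) (t : List String) :
    PySem.Str.join ", " (a :: b :: t) = a ++ ", " ++ PySem.Str.join ", " (b :: t) := by
  apply string_toList_eq
  simp [PySem.Chars.join_cons_cons]

theorem alt_eq_fmtSpec (lista : List String) : formataStr_alt lista = fmtSpec lista := by
  induction lista using fmtSpec.induct with
  | case1 => rfl
  | case2 a => rfl
  | case3 a b =>
    show PySem.Str.join ", " (PySem.List.slice [a, b] none (some (-1))) ++ " e "
        ++ PySem.List.pyGetD [a, b] (-1) "" = a ++ " e " ++ b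
    rw [PySem.List.slice_to_neg_one]
    have hlast : PySem.List.pyGetD [a, b] (-1) "" = b := by
      simp [PySem.List.pyGetD, PySem.List.pyIdx?, PySem.List.pyGet?]
    rw [hlast]
    apply string_toList_eq
    simp [PySem.Chars.join_singleton]
  | case4 a b c t ih =>
    show PySem.Str.join ", " (PySem.List.slice (a :: b :: c :: t) none (some (-1))) ++ " e "
        ++ PySem.List.pyGetD (a :: b :: c :: t) (-1) "" = fmtSpec (a :: b :: c :: t)
    have ih' : PySem.Str.join ", " (PySem.List.slice (b :: c :: t) none (some (-1))) ++ " e "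
        ++ PySem.List.pyGetD (b :: c :: t) (-1) "" = fmtSpec (b :: c :: t) := ih
    rw [PySem.List.slice_to_neg_one] at ih' ⊢
    have hlast : PySem.List.pyGetD (a :: b :: c :: t) (-1) ""
        = PySem.List.pyGetD (b :: c :: t) (-1) "" := by
      rw [PySem.List.pyGetD_neg_one (h := by simp), PySem.List.pyGetD_neg_one (h := by simp)]
      simp [List.getLast]
    have hdl : (a :: b :: c :: t).dropLast = a :: (b :: c :: t).dropLast := rfl
    rw [hdl, hlast]
    have hdl2 : (b :: c :: t).dropLast = b :: (c :: t).dropLast := rfl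
    rw [hdl2, join_cons_cons, ← hdl2]
    rw [show fmtSpec (a :: b :: c :: t) = a ++ ", " ++ fmtSpec (b :: c :: t) from rfl, ← ih']
    simp [String.append_assoc]

-- the loop body always appends; pull the accumulator out
theorem foldA_acc (lista : List String) (r : List Int) (s t : String) :
    r.foldl (fun novastr x =>
      if x == (lista.length : Int) - 1 then novastr ++ PySem.List.pyGetD lista x ""
      else if x == (lista.length : Int) - 2 then novastr ++ PySem.List.pyGetD lista x "" ++ " e "
      else novastr ++ PySem.List.pyGetD lista x "" ++ ", ") (s ++ t)
    = s ++ r.foldl (fun novastr x =>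
      if x == (lista.length : Int) - 1 then novastr ++ PySem.List.pyGetD lista x ""
      else if x == (lista.length : Int) - 2 then novastr ++ PySem.List.pyGetD lista x "" ++ " e "
      else novastr ++ PySem.List.pyGetD lista x "" ++ ", ") t := by
  induction r generalizing t with
  | nil => rfl
  | cons x r ih =>
    simp only [List.foldl_cons]
    have hstep : ∀ (u v : String),
        (if x == (lista.length : Int) - 1 then (u ++ v) ++ PySem.List.pyGetD lista x ""
         else if x == (lista.length : Int) - 2 then (u ++ v) ++ PySem.List.pyGetD lista x "" ++ " e "
         else (u ++ v) ++ PySem.List.pyGetD lista x "" ++ ", ")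
        = u ++ (if x == (lista.length : Int) - 1 then v ++ PySem.List.pyGetD lista x ""
         else if x == (lista.length : Int) - 2 then v ++ PySem.List.pyGetD lista x "" ++ " e "
         else v ++ PySem.List.pyGetD lista x "" ++ ", ") := by
      intro u v
      split_ifs <;> simp [String.append_assoc]
    rw [hstep, ih]

-- shifting the index by one drops the head of the list
theorem foldA_shift (a : String) (rest : List String) (t : String) :
    (PySem.List.pyRange 1 ((a :: rest).length : Int) 1).foldl (fun novastr x =>
      if x == ((a :: rest).length : Int) - 1 then novastr ++ PySem.List.pyGetD (a :: rest) x ""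
      else if x == ((a :: rest).length : Int) - 2 then novastr ++ PySem.List.pyGetD (a :: rest) x "" ++ " e "
      else novastr ++ PySem.List.pyGetD (a :: rest) x "" ++ ", ") t
    = (PySem.List.pyRange 0 (rest.length : Int) 1).foldl (fun novastr x =>
      if x == (rest.length : Int) - 1 then novastr ++ PySem.List.pyGetD rest x ""
      else if x == (rest.length : Int) - 2 then novastr ++ PySem.List.pyGetD rest x "" ++ " e "
      else novastr ++ PySem.List.pyGetD rest x "" ++ ", ") t := by
  rw [PySem.List.pyRange_one 1 ((a :: rest).length : Int),
      PySem.List.pyRange_one 0 (rest.length : Int)]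
  have hlen : (((a :: rest).length : Int) - 1).toNat = ((rest.length : Int) - 0).toNat := by
    simp
  rw [hlen, List.foldl_map, List.foldl_map]
  apply PySem.List.foldl_congr_mem
  intro acc k hk
  have hk' : k < rest.length := by
    simpa using List.mem_range.mp hk
  have hget : PySem.List.pyGetD (a :: rest) (1 + (k : Int)) "" = PySem.List.pyGetD rest (0 + (k : Int)) "" := by
    have h1 : (1 + (k : Int)) = ((k + 1 : Nat) : Int) := by push_cast; ring
    have h2 : (0 + (k : Int)) = ((k : Nat) : Int) := by ring
    rw [h1, h2, PySem.List.pyGetD_natCast, PySem.List.pyGetD_natCast]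
    rfl
  have hc1 : (1 + (k : Int) == ((a :: rest).length : Int) - 1) = ((0 + (k : Int)) == (rest.length : Int) - 1) := by
    simp only [List.length_cons]
    by_cases h : (k : Int) = (rest.length : Int) - 1
    · simp_all
    · simp_all
      omega
  have hc2 : (1 + (k : Int) == ((a :: rest).length : Int) - 2) = ((0 + (k : Int)) == (rest.length : Int) - 2) := by
    simp only [List.length_cons]
    by_cases h : (k : Int) = (rest.length : Int) - 2
    · simp_all
      omega
    · simp_all
      omega
  rw [hget, hc1, hc2]

theorem a_eq_fmtSpec (lista : List String) : formataStr lista = fmtSpec lista := by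
  induction lista using fmtSpec.induct with
  | case1 => rfl
  | case2 a =>
    show formataStr [a] = a
    have hr : PySem.List.pyRange 0 (([a] : List String).length : Int) 1 = [0] := by
      show PySem.List.pyRange 0 (1 : Int) 1 = [0]
      decide
    rw [formataStr, hr]
    apply string_toList_eq
    norm_num [List.foldl, PySem.List.pyGetD, PySem.List.pyIdx?, PySem.List.pyGet?]
  | case3 a b =>
    show formataStr [a, b] = a ++ " e " ++ b
    have hr : PySem.List.pyRange 0 (([a, b] : List String).length : Int) 1 = [0, 1] := by
      show PySem.List.pyRange 0 (2 : Int) 1 = [0, 1]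
      decide
    rw [formataStr, hr]
    apply string_toList_eq
    norm_num [List.foldl, PySem.List.pyGetD, PySem.List.pyIdx?, PySem.List.pyGet?]
  | case4 a b c t ih =>
    have hlen : (0 : Int) < ((a :: b :: c :: t).length : Int) := by simp only [List.length_cons]; push_cast; omega
    show (PySem.List.pyRange 0 ((a :: b :: c :: t).length : Int) 1).foldl _ "" = _
    rw [PySem.List.pyRange_one_cons hlen, List.foldl_cons, show (0 : Int) + 1 = 1 from rfl]
    have hstep : (if (0 : Int) == ((a :: b :: c :: t).length : Int) - 1 then
          "" ++ PySem.List.pyGetD (a :: b :: c :: t) 0 ""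
        else if (0 : Int) == ((a :: b :: c :: t).length : Int) - 2 then
          "" ++ PySem.List.pyGetD (a :: b :: c :: t) 0 "" ++ " e "
        else "" ++ PySem.List.pyGetD (a :: b :: c :: t) 0 "" ++ ", ")
        = ("" ++ a ++ ", ") := by
      have h1 : ((0 : Int) == ((a :: b :: c :: t).length : Int) - 1) = false := by
        simp only [List.length_cons]; push_cast; simp; omega
      have h2 : ((0 : Int) == ((a :: b :: c :: t).length : Int) - 2) = false := by
        simp only [List.length_cons]; push_cast; simp; omega
      rw [h1, h2]
      simp [PySem.List.pyGetD_zero_cons]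
    rw [hstep, foldA_shift a (b :: c :: t)]
    have hacc : ("" ++ a ++ ", ") = (a ++ ", ") ++ "" := by
      apply string_toList_eq; simp
    rw [hacc, foldA_acc (b :: c :: t)]
    show (a ++ ", ") ++ formataStr (b :: c :: t) = fmtSpec (a :: b :: c :: t)
    rw [ih]
    rfl

-- ===== VERDICT (by name: the statement is the Claim_ definition above) =====
theorem formataStr_spec : Claim_equal_formataStr := by
  intro lista _
  show formataStr lista = formataStr_alt lista
  rw [a_eq_fmtSpec, alt_eq_fmtSpec]
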